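-- pv_equiv track=rewrite | github.com/voipmonitor/rtx6kpro | benchmarks/inference-throughput/benchmark_sglang.py | generate_padding_text
-- ===== SOURCE A (Python) =====
-- CHARS_PER_TOKEN = 4
--
-- PADDING_SENTENCES = [
--     "The history of European architecture spans thousands of years and encompasses a wide variety of styles and movements.",
--     "From the ancient Greek temples to the Gothic cathedrals of the Middle Ages, each era has left its distinctive mark on the built environment.",
--     "The Renaissance brought a renewed interest in classical forms, while the Baroque period introduced dramatic ornamentation and grandeur.",
--     "In the modern era, architects have experimented with new materials such as steel, glass, and reinforced concrete.",
--     "The development of skyscrapers in the late 19th century transformed urban landscapes around the world.",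
--     "Sustainable architecture has become increasingly important as societies grapple with climate change and resource depletion.",
--     "The principles of good design include functionality, durability, and aesthetic appeal.",
--     "Urban planning plays a crucial role in shaping how cities develop and how their inhabitants experience daily life.",
--     "Public spaces such as parks, plazas, and waterfronts contribute significantly to the quality of urban living.",
--     "The integration of technology into building design has opened up new possibilities for energy efficiency and comfort.",
--     "Historical preservation efforts seek to maintain the cultural heritage embodied in older structures.",
--     "The relationship between architecture and nature has been explored by many influential designers throughout history.",
--     "Building codes and regulations ensure that structures meet minimum standards for safety and accessibility.",
--     "The choice of materials in construction affects not only the appearance of a building but also its environmental impact.",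
--     "Innovative structural engineering techniques have made it possible to create buildings of unprecedented scale and complexity.",
--     "The study of vernacular architecture reveals how different cultures have adapted their building practices to local conditions.",
--     "Interior design complements architecture by addressing the arrangement and decoration of interior spaces.",
--     "Landscape architecture deals with the design of outdoor areas, landmarks, and structures to achieve environmental or aesthetic outcomes.",
--     "The concept of smart cities integrates information technology with urban infrastructure to improve efficiency and quality of life.",
--     "Affordable housing remains one of the most pressing challenges facing urban planners and policymakers worldwide.",
-- ]
--
-- def generate_padding_text(target_tokens: int) -> str:
--     target_chars = target_tokens * CHARS_PER_TOKEN
--     lines = []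
--     current_chars = 0
--     idx = 0
--     while current_chars < target_chars:
--         sentence = PADDING_SENTENCES[idx % len(PADDING_SENTENCES)]
--         lines.append(sentence)
--         current_chars += len(sentence) + 1
--         idx += 1
--     return " ".join(lines)
-- ===== SOURCE B (Python) =====
-- CHARS_PER_TOKEN = 4
--
-- PADDING_SENTENCES = [
--     "The history of European architecture spans thousands of years and encompasses a wide variety of styles and movements.",
--     "From the ancient Greek temples to the Gothic cathedrals of the Middle Ages, each era has left its distinctive mark on the built environment.",
--     "The Renaissance brought a renewed interest in classical forms, while the Baroque period introduced dramatic ornamentation and grandeur.",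
--     "In the modern era, architects have experimented with new materials such as steel, glass, and reinforced concrete.",
--     "The development of skyscrapers in the late 19th century transformed urban landscapes around the world.",
--     "Sustainable architecture has become increasingly important as societies grapple with climate change and resource depletion.",
--     "The principles of good design include functionality, durability, and aesthetic appeal.",
--     "Urban planning plays a crucial role in shaping how cities develop and how their inhabitants experience daily life.",
--     "Public spaces such as parks, plazas, and waterfronts contribute significantly to the quality of urban living.",
--     "The integration of technology into building design has opened up new possibilities for energy efficiency and comfort.",
--     "Historical preservation efforts seek to maintain the cultural heritage embodied in older structures.",
--     "The relationship between architecture and nature has been explored by many influential designers throughout history.",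
--     "Building codes and regulations ensure that structures meet minimum standards for safety and accessibility.",
--     "The choice of materials in construction affects not only the appearance of a building but also its environmental impact.",
--     "Innovative structural engineering techniques have made it possible to create buildings of unprecedented scale and complexity.",
--     "The study of vernacular architecture reveals how different cultures have adapted their building practices to local conditions.",
--     "Interior design complements architecture by addressing the arrangement and decoration of interior spaces.",
--     "Landscape architecture deals with the design of outdoor areas, landmarks, and structures to achieve environmental or aesthetic outcomes.",
--     "The concept of smart cities integrates information technology with urban infrastructure to improve efficiency and quality of life.",
--     "Affordable housing remains one of the most pressing challenges facing urban planners and policymakers worldwide.",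
-- ]
--
-- # prefix[i] = cumulative (len(sentence)+1) over the first i sentences of one cycle
-- _PREFIX = [0]
-- for _s in PADDING_SENTENCES:
--     _PREFIX.append(_PREFIX[-1] + len(_s) + 1)
-- _CYCLE = _PREFIX[-1]
--
--
-- def generate_padding_text(target_tokens: int) -> str:
--     target_chars = target_tokens * CHARS_PER_TOKEN
--     if target_chars <= 0:
--         return ""
--     q, rem = divmod(target_chars, _CYCLE)
--     if rem == 0:
--         n = q * len(PADDING_SENTENCES)
--     else:
--         k = 0
--         while _PREFIX[k] < rem:
--             k += 1
--         n = q * len(PADDING_SENTENCES) + k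
--     return " ".join(PADDING_SENTENCES[i % len(PADDING_SENTENCES)] for i in range(n))
-- ===== Notes on version B (the rewrite author's own statement) =====
-- stated objective: alternative
-- what changed: Replaces A's sentence-by-sentence accumulation loop (append plus running character count until the target is reached) by a closed-form count: a precomputed prefix-sum table of per-sentence weights over one cycle, integer divmod by the cycle total for the full cycles plus a short scan of the table for the partial cycle, then a single join over that many sentences.
import Mathlib
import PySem

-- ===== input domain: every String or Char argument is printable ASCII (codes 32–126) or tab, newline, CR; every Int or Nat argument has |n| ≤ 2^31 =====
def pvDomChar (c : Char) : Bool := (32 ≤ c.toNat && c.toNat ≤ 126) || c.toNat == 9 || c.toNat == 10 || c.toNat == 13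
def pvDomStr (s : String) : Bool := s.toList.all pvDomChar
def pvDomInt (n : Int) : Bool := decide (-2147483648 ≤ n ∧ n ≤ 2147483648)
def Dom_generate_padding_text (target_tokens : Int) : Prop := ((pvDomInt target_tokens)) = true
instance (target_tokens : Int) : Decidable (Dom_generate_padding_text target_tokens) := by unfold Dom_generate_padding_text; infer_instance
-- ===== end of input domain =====

-- B replaces A's sentence-by-sentence accumulation loop by a closed-form computation of the
-- sentence count from a precomputed prefix-sum table of one 20-sentence cycle (alternative
-- decomposition; the output join is unchanged).

-- ===== PORT A =====
def pvPads : List String := [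
  "The history of European architecture spans thousands of years and encompasses a wide variety of styles and movements.",
  "From the ancient Greek temples to the Gothic cathedrals of the Middle Ages, each era has left its distinctive mark on the built environment.",
  "The Renaissance brought a renewed interest in classical forms, while the Baroque period introduced dramatic ornamentation and grandeur.",
  "In the modern era, architects have experimented with new materials such as steel, glass, and reinforced concrete.",
  "The development of skyscrapers in the late 19th century transformed urban landscapes around the world.",
  "Sustainable architecture has become increasingly important as societies grapple with climate change and resource depletion.",
  "The principles of good design include functionality, durability, and aesthetic appeal.",
  "Urban planning plays a crucial role in shaping how cities develop and how their inhabitants experience daily life.",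
  "Public spaces such as parks, plazas, and waterfronts contribute significantly to the quality of urban living.",
  "The integration of technology into building design has opened up new possibilities for energy efficiency and comfort.",
  "Historical preservation efforts seek to maintain the cultural heritage embodied in older structures.",
  "The relationship between architecture and nature has been explored by many influential designers throughout history.",
  "Building codes and regulations ensure that structures meet minimum standards for safety and accessibility.",
  "The choice of materials in construction affects not only the appearance of a building but also its environmental impact.",
  "Innovative structural engineering techniques have made it possible to create buildings of unprecedented scale and complexity.",
  "The study of vernacular architecture reveals how different cultures have adapted their building practices to local conditions.",
  "Interior design complements architecture by addressing the arrangement and decoration of interior spaces.",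
  "Landscape architecture deals with the design of outdoor areas, landmarks, and structures to achieve environmental or aesthetic outcomes.",
  "The concept of smart cities integrates information technology with urban infrastructure to improve efficiency and quality of life.",
  "Affordable housing remains one of the most pressing challenges facing urban planners and policymakers worldwide."]

theorem pvLen_nonneg (s : String) : 0 ≤ PySem.Str.len s := by
  simp [PySem.Str.len_eq]

-- A's while loop; idx % 20 is always a valid index, so the getD default is never read.
def pvLoopA (target : Int) (lines : List String) (cur : Int) (idx : Nat) : List String :=
  if cur < target then
    let s := pvPads.getD (idx % 20) ""
    pvLoopA target (lines ++ [s]) (cur + PySem.Str.len s + 1) (idx + 1)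
  else lines
termination_by (target - cur).toNat
decreasing_by
  have := pvLen_nonneg (pvPads.getD (idx % 20) "")
  omega

def generate_padding_text (target_tokens : Int) : String :=
  PySem.Str.join " " (pvLoopA (target_tokens * 4) [] 0 0)

-- ===== PORT B =====
-- prefix[i] = cumulative (len+1) over the first i sentences of one cycle (Source B's module-level loop)
def pvPrefix : List Int :=
  pvPads.foldl (fun acc s => acc ++ [acc.getLastD 0 + PySem.Str.len s + 1]) [0]

def pvCycle : Int := pvPrefix.getLastD 0

-- Source B's 'while _PREFIX[k] < rem: k += 1'
def pvFindK : List Int → Int → Nat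
  | [], _ => 0
  | p :: rest, rem => if p < rem then pvFindK rest rem + 1 else 0

def generate_padding_text_alt (target_tokens : Int) : String :=
  let target_chars := target_tokens * 4
  if target_chars ≤ 0 then ""
  else
    let q := PySem.Int.floordiv target_chars pvCycle
    let rem := PySem.Int.mod target_chars pvCycle
    let n := if rem = 0 then q.toNat * 20 else q.toNat * 20 + pvFindK pvPrefix rem
    PySem.Str.join " " ((List.range n).map (fun i => pvPads.getD (i % 20) ""))

-- ===== PRECONDITION & SPEC =====
def Spec_generate_padding_text (target_tokens : Int) (out : String) : Prop := out = generate_padding_text_alt target_tokens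
instance (target_tokens : Int) (out : String) : Decidable (Spec_generate_padding_text target_tokens out) := by unfold Spec_generate_padding_text; infer_instance

-- ===== CLAIM (what is proved, stated in full; the proofs are below) =====
def Claim_equal_generate_padding_text : Prop := ∀ (target_tokens : Int), Dom_generate_padding_text target_tokens → Spec_generate_padding_text target_tokens (generate_padding_text target_tokens)

-- ===== LEMMAS AND PROOFS =====

-- the i-th appended sentence and its weight (len + 1)
def pvSeq (i : Nat) : String := pvPads.getD (i % 20) ""
def pvWt (i : Nat) : Int := PySem.Str.len (pvSeq i) + 1

-- sum of the weights of n consecutive sentences starting at index idx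
def pvSF (idx n : Nat) : Int := ((List.range n).map (fun j => pvWt (idx + j))).sum

-- loop count of A's while loop
def pvCnt (target cur : Int) (idx : Nat) : Nat :=
  if cur < target then pvCnt target (cur + pvWt idx) (idx + 1) + 1 else 0
termination_by (target - cur).toNat
decreasing_by
  have := pvLen_nonneg (pvSeq idx)
  simp only [pvWt] at *
  omega

theorem pvWt_pos (i : Nat) : 1 ≤ pvWt i := by
  have := pvLen_nonneg (pvSeq i)
  simp only [pvWt]; omega

theorem pvSF_zero (idx : Nat) : pvSF idx 0 = 0 := rfl

theorem pvSF_succ_front (idx n : Nat) :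
    pvSF idx (n + 1) = pvWt idx + pvSF (idx + 1) n := by
  simp [pvSF, List.range_succ_eq_map, List.map_map, Function.comp_def,
        Nat.succ_eq_add_one, Nat.add_comm, Nat.add_left_comm]

theorem pvSF_succ_back (idx n : Nat) :
    pvSF idx (n + 1) = pvSF idx n + pvWt (idx + n) := by
  simp [pvSF, List.range_succ]

theorem pvSF_ge_n (idx n : Nat) : (n : Int) ≤ pvSF idx n := by
  induction n with
  | zero => simp [pvSF_zero]
  | succ m ih =>
    have := pvWt_pos (idx + m)
    rw [pvSF_succ_back]
    push_cast
    omega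

theorem pvSF_split (idx a b : Nat) : pvSF idx (a + b) = pvSF idx a + pvSF (idx + a) b := by
  induction a generalizing idx with
  | zero => simp [pvSF_zero]
  | succ a ih =>
    have h1 : a + 1 + b = (a + b) + 1 := by omega
    rw [show (a + 1) + b = (a + b) + 1 from by omega]
    rw [pvSF_succ_front, ih (idx + 1), pvSF_succ_front]
    rw [show idx + 1 + a = idx + (a + 1) from by omega]
    ring

theorem pvSF_le (idx a b : Nat) (h : a ≤ b) : pvSF idx a ≤ pvSF idx b := by
  rw [show b = a + (b - a) from by omega, pvSF_split]
  have := pvSF_ge_n (idx + a) (b - a)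
  omega

theorem pvWt_period (i : Nat) : pvWt (i + 20) = pvWt i := by
  simp [pvWt, pvSeq, Nat.add_mod_right]

theorem pvSF_cycle_shift (idx : Nat) : pvSF idx 20 = pvSF 0 20 := by
  induction idx with
  | zero => rfl
  | succ i ih =>
    have h1 : pvSF i 21 = pvWt i + pvSF (i + 1) 20 := pvSF_succ_front i 20
    have h2 : pvSF i 21 = pvSF i 20 + pvWt (i + 20) := pvSF_succ_back i 20
    have h3 := pvWt_period i
    omega

theorem pvLoopA_eq_range (target : Int) (lines : List String) (cur : Int) (idx : Nat) :
    pvLoopA target lines cur idx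
      = lines ++ (List.range (pvCnt target cur idx)).map (fun j => pvSeq (idx + j)) := by
  rw [pvLoopA, pvCnt]
  by_cases h : cur < target
  · simp only [if_pos h]
    have hc : cur + PySem.Str.len (pvPads.getD (idx % 20) "") + 1 = cur + pvWt idx := by
      simp only [pvWt, pvSeq]; ring
    rw [hc, pvLoopA_eq_range target (lines ++ [pvPads.getD (idx % 20) ""]) (cur + pvWt idx) (idx + 1)]
    rw [List.range_succ_eq_map, List.map_cons, List.map_map, List.append_assoc,
        List.singleton_append]
    have h1 : ((fun j : Nat => pvSeq (idx + j)) ∘ Nat.succ) = (fun j : Nat => pvSeq (idx + 1 + j)) := by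
      funext j
      simp only [Function.comp_apply, Nat.succ_eq_add_one]
      congr 1
      omega
    rw [h1]
    simp [pvSeq]
  · simp [if_neg h]
termination_by (target - cur).toNat
decreasing_by
  have := pvWt_pos idx
  omega

theorem pvCnt_spec (target cur : Int) (idx : Nat) :
    target - cur ≤ pvSF idx (pvCnt target cur idx)
      ∧ ∀ m < pvCnt target cur idx, pvSF idx m < target - cur := by
  rw [pvCnt]
  by_cases h : cur < target
  · simp only [if_pos h]
    obtain ⟨ih1, ih2⟩ := pvCnt_spec target (cur + pvWt idx) (idx + 1)
    constructor
    · rw [pvSF_succ_front]; omega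
    · intro m hm
      match m with
      | 0 => rw [pvSF_zero]; omega
      | m' + 1 =>
        have := ih2 m' (by omega)
        rw [pvSF_succ_front]; omega
  · simp only [if_neg h]
    refine ⟨by rw [pvSF_zero]; omega, by omega⟩
termination_by (target - cur).toNat
decreasing_by
  have := pvWt_pos idx
  omega

theorem pvCnt_unique (C : Int) (n : Nat)
    (h1 : C ≤ pvSF 0 n) (h2 : ∀ m < n, pvSF 0 m < C) :
    pvCnt C 0 0 = n := by
  obtain ⟨s1, s2⟩ := pvCnt_spec C 0 0
  simp only [Int.sub_zero] at s1 s2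
  rcases lt_trichotomy (pvCnt C 0 0) n with hlt | heq | hgt
  · have := h2 _ hlt; omega
  · exact heq
  · have := s2 n hgt; omega

-- ===== the prefix-sum table computes pvSF, structurally (no string evaluation) =====

def pvScan (start : Int) : List String → List Int
  | [] => []
  | s :: r => (start + PySem.Str.len s + 1) :: pvScan (start + PySem.Str.len s + 1) r

theorem pvScan_length (l : List String) (start : Int) : (pvScan start l).length = l.length := by
  induction l generalizing start with
  | nil => rfl
  | cons s r ih => simp [pvScan, ih]

theorem pvFold_scan (l : List String) (acc : List Int) (h : acc ≠ []) :
    l.foldl (fun acc s => acc ++ [acc.getLastD 0 + PySem.Str.len s + 1]) acc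
      = acc ++ pvScan (acc.getLastD 0) l := by
  induction l generalizing acc with
  | nil => simp [pvScan]
  | cons s r ih =>
    simp only [List.foldl_cons]
    rw [ih (acc ++ [acc.getLastD 0 + PySem.Str.len s + 1]) (by simp)]
    simp [pvScan]

theorem pvPrefix_repr : pvPrefix = 0 :: pvScan 0 pvPads := by
  rw [pvPrefix, pvFold_scan pvPads [0] (by simp)]
  rfl

theorem pvPads_length : pvPads.length = 20 := rfl

theorem pvScan_getD (l : List String) (idx : Nat) (start : Int)
    (hyp : ∀ j < l.length, l.getD j "" = pvSeq (idx + j)) :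
    ∀ k < l.length, (pvScan start l).getD k 0 = start + pvSF idx (k + 1) := by
  induction l generalizing idx start with
  | nil => intro k hk; simp at hk
  | cons s r ih =>
    intro k hk
    have h0 : s = pvSeq idx := by
      have := hyp 0 (by simp)
      simpa using this
    match k with
    | 0 =>
      simp only [pvScan, List.getD_cons_zero]
      rw [pvSF_succ_front, pvSF_zero, pvWt, ← h0]
      ring
    | k' + 1 =>
      simp only [pvScan, List.getD_cons_succ]
      rw [ih (idx + 1) (start + PySem.Str.len s + 1)
            (fun j hj => by
              have := hyp (j + 1) (by simpa using Nat.succ_lt_succ hj)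
              simpa [Nat.add_assoc, Nat.add_comm, Nat.add_left_comm] using this)
            k' (by simpa using Nat.lt_of_succ_lt_succ hk)]
      rw [pvSF_succ_front idx (k' + 1), pvWt, ← h0]
      ring

theorem pvPads_getD_eq (j : Nat) (hj : j < 20) : pvPads.getD j "" = pvSeq j := by
  simp [pvSeq, Nat.mod_eq_of_lt hj]

theorem pvPrefix_getD (k : Nat) (hk : k ≤ 20) : pvPrefix.getD k 0 = pvSF 0 k := by
  rw [pvPrefix_repr]
  match k with
  | 0 => simp [pvSF_zero]
  | k' + 1 =>
    simp only [List.getD_cons_succ]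
    rw [pvScan_getD pvPads 0 0 (fun j hj => by
            have := pvPads_getD_eq j (by rw [pvPads_length] at hj; omega)
            simpa using this)
          k' (by rw [pvPads_length]; omega)]
    omega

theorem pvPrefix_length : pvPrefix.length = 21 := by
  rw [pvPrefix_repr]
  simp [pvScan_length, pvPads_length]

theorem pvGetLastD_eq_getD (l : List Int) (d : Int) : l.getLastD d = l.getD (l.length - 1) d := by
  induction l with
  | nil => rfl
  | cons a t ih =>
    match t with
    | [] => rfl
    | b :: t' => simpa using ih

theorem pvCycle_eq : pvCycle = pvSF 0 20 := by
  rw [pvCycle, pvGetLastD_eq_getD, pvPrefix_length]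
  exact pvPrefix_getD 20 (by omega)

theorem pvCycle_pos : 0 < pvCycle := by
  rw [pvCycle_eq]
  have := pvSF_ge_n 0 20
  omega

theorem pvSF_add20 (n : Nat) : pvSF 0 (n + 20) = pvSF 0 n + pvCycle := by
  rw [pvSF_split, pvSF_cycle_shift, pvCycle_eq]

theorem pvSF_cycles (q k : Nat) : pvSF 0 (q * 20 + k) = (q : Int) * pvCycle + pvSF 0 k := by
  induction q with
  | zero => simp
  | succ q ih =>
    rw [show (q + 1) * 20 + k = (q * 20 + k) + 20 from by ring, pvSF_add20, ih]
    push_cast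
    ring

theorem pvFindK_spec (l : List Int) (rem : Int) (h : ∃ p ∈ l, ¬ p < rem) :
    pvFindK l rem < l.length ∧ ¬ (l.getD (pvFindK l rem) 0 < rem)
      ∧ ∀ j < pvFindK l rem, l.getD j 0 < rem := by
  induction l with
  | nil => simp at h
  | cons p rest ih =>
    by_cases hp : p < rem
    · simp only [pvFindK, if_pos hp]
      have hrest : ∃ p' ∈ rest, ¬ p' < rem := by
        obtain ⟨p', hmem, hge⟩ := h
        rcases List.mem_cons.mp hmem with heq | hmem'
        · exact absurd hp (heq ▸ hge)
        · exact ⟨p', hmem', hge⟩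
      obtain ⟨ih1, ih2, ih3⟩ := ih hrest
      refine ⟨by simpa using Nat.succ_lt_succ ih1, by simpa using ih2, ?_⟩
      intro j hj
      match j with
      | 0 => simpa using hp
      | j' + 1 => simpa using ih3 j' (by omega)
    · simp only [pvFindK, if_neg hp]
      exact ⟨by simp, by simpa using hp, by omega⟩

-- the candidate count used by B satisfies the minimality characterisation, hence equals pvCnt
theorem pvCnt_eq_of_bounds (C : Int) (n : Nat) (hn : 1 ≤ n)
    (h1 : C ≤ pvSF 0 n) (h2 : pvSF 0 (n - 1) < C) : pvCnt C 0 0 = n := by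
  refine pvCnt_unique C n h1 (fun m hm => ?_)
  have := pvSF_le 0 m (n - 1) (by omega)
  omega

theorem pvJoin_empty : PySem.Str.join " " ([] : List String) = "" := by decide

-- ===== VERDICT (by name: the statement is the Claim_ definition above) =====
theorem generate_padding_text_spec : Claim_equal_generate_padding_text := by
  unfold Claim_equal_generate_padding_text Spec_generate_padding_text
  intro t _
  rw [generate_padding_text, generate_padding_text_alt]
  set C := t * 4 with hC
  by_cases hpos : C ≤ 0
  · rw [if_pos hpos, pvLoopA, if_neg (by omega)]
    exact pvJoin_empty
  · rw [if_neg hpos]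
    rw [pvLoopA_eq_range]
    simp only [List.nil_append]
    have hcyc := pvCycle_pos
    set q := PySem.Int.floordiv C pvCycle with hq
    set rem := PySem.Int.mod C pvCycle with hrem
    have hdm : q * pvCycle + rem = C := PySem.Int.floordiv_mul_add_mod C pvCycle
    have hrnn : 0 ≤ rem := PySem.Int.mod_nonneg C hcyc
    have hrlt : rem < pvCycle := PySem.Int.mod_lt C hcyc
    have hqnn : 0 ≤ q := by nlinarith
    have hqcast : ((q.toNat : Int)) = q := Int.toNat_of_nonneg hqnn
    have hmap : (fun j : Nat => pvSeq (0 + j)) = (fun i : Nat => pvPads.getD (i % 20) "") := by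
      funext j; simp [pvSeq]
    by_cases hr0 : rem = 0
    · rw [if_pos hr0]
      have hq1 : 1 ≤ q := by nlinarith
      have hn : pvCnt C 0 0 = q.toNat * 20 := by
        apply pvCnt_eq_of_bounds
        · omega
        · rw [show q.toNat * 20 = q.toNat * 20 + 0 from by omega, pvSF_cycles, pvSF_zero, hqcast]
          omega
        · have h19 : q.toNat * 20 - 1 = (q.toNat - 1) * 20 + 19 := by omega
          rw [h19, pvSF_cycles]
          have hlt : pvSF 0 19 < pvCycle := by
            rw [pvCycle_eq]
            have h20 : pvSF 0 20 = pvSF 0 19 + pvWt (0 + 19) := pvSF_succ_back 0 19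
            have := pvWt_pos (0 + 19)
            omega
          have hcast1 : ((q.toNat - 1 : Nat) : Int) = q - 1 := by omega
          rw [hcast1]
          nlinarith
      rw [hn, hmap]
    · rw [if_neg hr0]
      have hrpos : 0 < rem := by omega
      have hex : ∃ p ∈ pvPrefix, ¬ p < rem := by
        refine ⟨pvPrefix.getD 20 0, ?_, ?_⟩
        · have h20 : 20 < pvPrefix.length := by rw [pvPrefix_length]; omega
          rw [List.getD_eq_getElem pvPrefix 0 h20]
          exact List.getElem_mem h20
        · rw [pvPrefix_getD 20 (by omega), ← pvCycle_eq]; omega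
      obtain ⟨hk1, hk2, hk3⟩ := pvFindK_spec pvPrefix rem hex
      set k := pvFindK pvPrefix rem with hkdef
      rw [pvPrefix_length] at hk1
      have hkle : k ≤ 20 := by omega
      have hkSF : rem ≤ pvSF 0 k := by
        have := hk2; rw [pvPrefix_getD k hkle] at this; omega
      have hkpos : 1 ≤ k := by
        by_contra hk0
        have hk0' : k = 0 := by omega
        rw [hk0', pvPrefix_getD 0 (by omega), pvSF_zero] at hk2
        omega
      have hkprev : pvSF 0 (k - 1) < rem := by
        have := hk3 (k - 1) (by omega)
        rw [pvPrefix_getD (k - 1) (by omega)] at this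
        exact this
      have hn : pvCnt C 0 0 = q.toNat * 20 + k := by
        apply pvCnt_eq_of_bounds
        · omega
        · rw [pvSF_cycles, hqcast]; omega
        · rw [show q.toNat * 20 + k - 1 = q.toNat * 20 + (k - 1) from by omega, pvSF_cycles, hqcast]
          omega
      rw [hn, hmap]
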